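-- pv_equiv track=rewrite | github.com/NucleicAcidTest/ymca | problems/p001_library_assignment_order/solution.py | safe_order
-- ===== SOURCE A (Python) =====
-- def safe_order(avail, issued, required):
--     n = len(issued)
--     m = len(avail)
--
--     need = []
--     for i in range(n):
--         row = []
--         for j in range(m):
--             if required[i][j] < issued[i][j]:
--                 return [-1]
--             row.append(required[i][j] - issued[i][j])
--         need.append(row)
--
--     done = [False] * n
--     order = []
--     current = avail[:]
--
--     for _ in range(n):
--         chosen = -1
--         for i in range(n):
--             if done[i]:
--                 continue
--             if all(need[i][j] <= current[j] for j in range(m)):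
--                 chosen = i
--                 break
--
--         if chosen == -1:
--             return [-1]
--
--         done[chosen] = True
--         order.append(chosen)
--         for j in range(m):
--             current[j] += issued[chosen][j]
--
--     return order
-- ===== SOURCE B (Python) =====
-- def _take_first_feasible(pending, cur):
--     for k, (i, nd, iss) in enumerate(pending):
--         if all(a <= b for a, b in zip(nd, cur)):
--             return pending[k], pending[:k] + pending[k + 1:]
--     return None
--
--
-- def safe_order(avail, issued, required):
--     m = len(avail)
--     need = [[r - s for r, s in zip(req[:m], iss[:m])]
--             for iss, req in zip(issued, required)]
--     if any(x < 0 for row in need for x in row):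
--         return [-1]
--
--     pending = [(i, nd, iss) for i, (nd, iss) in enumerate(zip(need, issued))]
--     order = []
--     cur = avail
--     while pending:
--         t = _take_first_feasible(pending, cur)
--         if t is None:
--             return [-1]
--         (i, nd, iss), pending = t
--         order.append(i)
--         cur = [c + x for c, x in zip(cur, iss)]
--     return order
-- ===== Notes on version B (the rewrite author's own statement) =====
-- stated objective: alternative
-- what changed: A keeps a done-flag array and rescans all n indices with per-index inner range(m) loops each round; B builds the need matrix with zip comprehensions in one pass, then runs a shrinking worklist of (index, need, issued) triples, removing the first feasible entry each round and updating resources with vectorized zips, so no done flags and no index arithmetic remain.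
-- outside the precondition, e.g. on safe_order([], [[0]], []): A returns [0], B returns []
import Mathlib
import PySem

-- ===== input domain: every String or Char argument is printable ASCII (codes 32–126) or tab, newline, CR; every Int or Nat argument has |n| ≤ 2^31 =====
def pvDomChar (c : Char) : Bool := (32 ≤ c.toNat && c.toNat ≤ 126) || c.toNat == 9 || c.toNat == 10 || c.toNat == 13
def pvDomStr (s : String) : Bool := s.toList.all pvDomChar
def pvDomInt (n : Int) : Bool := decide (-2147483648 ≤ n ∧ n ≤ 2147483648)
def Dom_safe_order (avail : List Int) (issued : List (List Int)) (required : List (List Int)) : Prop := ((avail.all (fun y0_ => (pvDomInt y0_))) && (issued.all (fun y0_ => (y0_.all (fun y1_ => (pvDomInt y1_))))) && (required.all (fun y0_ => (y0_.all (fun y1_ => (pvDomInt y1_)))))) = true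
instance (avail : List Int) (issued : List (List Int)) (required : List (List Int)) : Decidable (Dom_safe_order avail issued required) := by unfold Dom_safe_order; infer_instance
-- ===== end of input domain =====

-- B replaces A's done-flag array plus full index rescans by a shrinking worklist of
-- (index, need-row, issued-row) triples with zip-based vector operations (objective: alternative).

-- ===== PORT A =====
-- inner loop 'for j in range(m): if required[i][j] < issued[i][j]: return [-1]; row.append(...)'
-- (early return modelled as an Option-valued fold; indexing is via getD, exact under Pre_)
def pvRowA (req iss : List Int) (m : Nat) : Option (List Int) :=
  (List.range m).foldl
    (fun acc j => acc.bind (fun row =>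
      if req.getD j 0 < iss.getD j 0 then none
      else some (row ++ [req.getD j 0 - iss.getD j 0])))
    (some [])

-- outer loop 'for i in range(n): …; need.append(row)'
def pvNeedA (issued required : List (List Int)) (m : Nat) : Option (List (List Int)) :=
  (List.range issued.length).foldl
    (fun acc i => acc.bind (fun need =>
      (pvRowA (required.getD i []) (issued.getD i []) m).map (fun row => need ++ [row])))
    (some [])

-- 'all(need[i][j] <= current[j] for j in range(m))'
def pvFeasA (nd current : List Int) (m : Nat) : Bool :=
  (List.range m).all (fun j => nd.getD j 0 ≤ current.getD j 0)

-- 'for i in range(n): if done[i]: continue; if all(...): chosen = i; break'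
def pvChooseA (need : List (List Int)) (done : List Bool) (current : List Int) (m : Nat) :
    List Nat → Int
  | [] => -1
  | i :: rest =>
    if done.getD i false then pvChooseA need done current m rest
    else if pvFeasA (need.getD i []) current m then (i : Int)
    else pvChooseA need done current m rest

-- 'for _ in range(n): …' main loop; in-place 'current[j] += issued[chosen][j]' becomes
-- rebuilding current over range(m) (each slot is written once)
def pvLoopA (need issued : List (List Int)) (m n : Nat) :
    Nat → List Bool → List Int → List Int → Option (List Int)
  | 0, _done, order, _current => some order
  | k+1, done, order, current =>
    let c := pvChooseA need done current m (List.range n)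
    if c = -1 then none
    else
      pvLoopA need issued m n k (done.set c.toNat true) (order ++ [c])
        ((List.range m).map (fun j => current.getD j 0 + (issued.getD c.toNat []).getD j 0))

def safe_order (avail : List Int) (issued : List (List Int)) (required : List (List Int)) : List Int :=
  let n := issued.length
  let m := avail.length
  match pvNeedA issued required m with
  | none => [-1]
  | some need =>
    match pvLoopA need issued m n n (List.replicate n false) [] avail with
    | none => [-1]
    | some order => order

-- ===== PORT B =====
-- 'need = [[r - s for r, s in zip(req[:m], iss[:m])] for iss, req in zip(issued, required)]'
def pvNeedB (issued required : List (List Int)) (m : Nat) : List (List Int) :=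
  (issued.zip required).map (fun p => ((p.2.take m).zip (p.1.take m)).map (fun q => q.1 - q.2))

-- 'all(a <= b for a, b in zip(nd, cur))'
def pvFeasB (nd cur : List Int) : Bool :=
  (nd.zip cur).all (fun p => p.1 ≤ p.2)

-- _take_first_feasible: scan pending for the first feasible triple, return it and the rest
def pvFindB (cur : List Int) :
    List (Int × List Int × List Int) →
      Option ((Int × List Int × List Int) × List (Int × List Int × List Int))
  | [] => none
  | p :: rest =>
    if pvFeasB p.2.1 cur then some (p, rest)
    else match pvFindB cur rest with
         | none => none
         | some (q, rest') => some (q, p :: rest')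

lemma pvFindB_length (cur : List Int) (l : List (Int × List Int × List Int))
    (q : Int × List Int × List Int) (rest : List (Int × List Int × List Int))
    (h : pvFindB cur l = some (q, rest)) : rest.length + 1 = l.length := by
  induction l generalizing q rest with
  | nil => simp [pvFindB] at h
  | cons p tl ih =>
    rw [pvFindB] at h
    split at h
    · cases h; simp
    · cases htl : pvFindB cur tl with
      | none => rw [htl] at h; cases h
      | some v =>
        obtain ⟨q', rest'⟩ := v
        rw [htl] at h
        simp only [Option.some.injEq, Prod.mk.injEq] at h
        obtain ⟨rfl, rfl⟩ := h
        have := ih q' rest' htl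
        simp [← this]

-- 'while pending: …' main loop
def pvGoB (cur order : List Int) (pending : List (Int × List Int × List Int)) :
    Option (List Int) :=
  if pending = [] then some order
  else
    match h : pvFindB cur pending with
    | none => none
    | some (q, rest) => pvGoB (cur.zipWith (· + ·) q.2.2) (order ++ [q.1]) rest
termination_by pending.length
decreasing_by
  have := pvFindB_length cur pending q rest h
  omega

def safe_order_alt (avail : List Int) (issued : List (List Int)) (required : List (List Int)) : List Int :=
  let m := avail.length
  let need := pvNeedB issued required m
  if need.any (fun row => row.any (fun x => x < 0)) then [-1]
  else
    let pending := (PySem.List.enumerate (need.zip issued) 0).map (fun p => (p.1, p.2.1, p.2.2))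
    match pvGoB avail [] pending with
    | none => [-1]
    | some order => order

-- ===== PRECONDITION & SPEC =====
-- Pre_ admits the inputs on which A returns: either every scanned row of issued/required is
-- long enough (>= len(avail)) with no required<issued violation (A builds need and runs the main
-- loop, which cannot raise), or some row has an in-range required<issued violation with all
-- earlier rows complete (A returns [-1] early); outside Pre_ A raises IndexError, except for the
-- defensible corner where avail is empty and required has fewer rows than issued: there A's inner
-- loop is vacuous and never indexes required, while B pairs rows by zip (see the cite).
def Pre_safe_order (avail : List Int) (issued : List (List Int)) (required : List (List Int)) : Prop :=
  (∀ i < issued.length, i < required.length ∧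
      avail.length ≤ (required.getD i []).length ∧
      avail.length ≤ (issued.getD i []).length ∧
      ∀ j < avail.length, ¬((required.getD i []).getD j 0 < (issued.getD i []).getD j 0))
  ∨ (∃ i < issued.length, i < required.length ∧
      (∃ j < avail.length, j < (required.getD i []).length ∧ j < (issued.getD i []).length ∧
        (required.getD i []).getD j 0 < (issued.getD i []).getD j 0) ∧
      ∀ i' < i, avail.length ≤ (required.getD i' []).length ∧
        avail.length ≤ (issued.getD i' []).length ∧
        ∀ j < avail.length, ¬((required.getD i' []).getD j 0 < (issued.getD i' []).getD j 0))
instance (avail : List Int) (issued : List (List Int)) (required : List (List Int)) : Decidable (Pre_safe_order avail issued required) := by unfold Pre_safe_order; infer_instance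

def pvWitness_safe_order : List Int × List (List Int) × List (List Int) :=
  ([1, 1], [[1, 0], [0, 1]], [[1, 1], [1, 1]])

def Spec_safe_order (avail : List Int) (issued : List (List Int)) (required : List (List Int)) (out : List Int) : Prop := out = safe_order_alt avail issued required
instance (avail : List Int) (issued : List (List Int)) (required : List (List Int)) (out : List Int) : Decidable (Spec_safe_order avail issued required out) := by unfold Spec_safe_order; infer_instance

-- ===== CLAIM (what is proved, stated in full; the proofs are below) =====
def Claim_equal_safe_order : Prop := ∀ (avail : List Int) (issued : List (List Int)) (required : List (List Int)), Dom_safe_order avail issued required → Pre_safe_order avail issued required → Spec_safe_order avail issued required (safe_order avail issued required)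

-- ===== LEMMAS AND PROOFS =====

-- proof-only helpers
def pvRowFor (issued required : List (List Int)) (m : Nat) (i : Nat) : List Int :=
  (((required.getD i []).take m).zip ((issued.getD i []).take m)).map (fun q => q.1 - q.2)

def pvPend (need issued : List (List Int)) (done : List Bool) (L : List Nat) :
    List (Int × List Int × List Int) :=
  L.filterMap (fun i => if done.getD i false then none
                        else some (((i : Nat) : Int), need.getD i [], issued.getD i []))

lemma pvGetD_set_ne (done : List Bool) (i j : Nat) (hij : i ≠ j) (b : Bool) :
    (done.set i true).getD j b = done.getD j b := by
  simp [List.getD_eq_getElem?_getD, List.getElem?_set_ne hij]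

lemma pvGetD_set_self (done : List Bool) (i : Nat) (hi : i < done.length) (b : Bool) :
    (done.set i true).getD i b = true := by
  simp [List.getD_eq_getElem?_getD, List.getElem?_set_self (by simpa using hi)]

lemma pvFeas_eq (nd cur : List Int) (m : Nat) (h1 : nd.length = m) (h2 : cur.length = m) :
    pvFeasA nd cur m = pvFeasB nd cur := by
  rw [Bool.eq_iff_iff]
  simp only [pvFeasA, pvFeasB, List.all_eq_true, List.mem_range, decide_eq_true_eq]
  constructor
  · intro h p hp
    obtain ⟨j, hjlt, rfl⟩ := List.mem_iff_getElem.1 hp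
    have hj : j < m := by
      simpa [List.length_zip, h1, h2] using hjlt
    rw [List.getElem_zip]
    have := h j hj
    rwa [List.getD_eq_getElem nd 0 (by omega), List.getD_eq_getElem cur 0 (by omega)] at this
  · intro h j hj
    have hz : j < (nd.zip cur).length := by simp [List.length_zip, h1, h2]; omega
    have := h ((nd.zip cur)[j]) (List.getElem_mem hz)
    rw [List.getElem_zip] at this
    rwa [List.getD_eq_getElem nd 0 (by omega), List.getD_eq_getElem cur 0 (by omega)]

lemma pvPend_set_notmem (need issued : List (List Int)) (done : List Bool) (i : Nat)
    (L : List Nat) (hL : i ∉ L) :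
    pvPend need issued (done.set i true) L = pvPend need issued done L := by
  induction L with
  | nil => rfl
  | cons j tl ih =>
    simp only [List.mem_cons, not_or] at hL
    simp only [pvPend, List.filterMap_cons] at *
    rw [pvGetD_set_ne done i j hL.1, ih hL.2]

lemma pvPend_cons_true (need issued : List (List Int)) (done : List Bool) (a : Nat)
    (tl : List Nat) (h : done.getD a false = true) :
    pvPend need issued done (a :: tl) = pvPend need issued done tl := by
  simp only [pvPend, List.filterMap_cons]
  rw [h]
  simp

lemma pvPend_cons_false (need issued : List (List Int)) (done : List Bool) (a : Nat)
    (tl : List Nat) (h : done.getD a false = false) :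
    pvPend need issued done (a :: tl) =
      ((a : Int), need.getD a [], issued.getD a []) :: pvPend need issued done tl := by
  simp only [pvPend, List.filterMap_cons]
  rw [h]
  simp

lemma pvChooseA_cons_true (need : List (List Int)) (done : List Bool) (cur : List Int)
    (m : Nat) (a : Nat) (tl : List Nat) (h : done.getD a false = true) :
    pvChooseA need done cur m (a :: tl) = pvChooseA need done cur m tl := by
  rw [pvChooseA, h]
  simp

lemma pvChooseA_cons_feas (need : List (List Int)) (done : List Bool) (cur : List Int)
    (m : Nat) (a : Nat) (tl : List Nat) (h : done.getD a false = false)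
    (hf : pvFeasA (need.getD a []) cur m = true) :
    pvChooseA need done cur m (a :: tl) = (a : Int) := by
  rw [pvChooseA, h, hf]
  simp

lemma pvChooseA_cons_infeas (need : List (List Int)) (done : List Bool) (cur : List Int)
    (m : Nat) (a : Nat) (tl : List Nat) (h : done.getD a false = false)
    (hf : pvFeasA (need.getD a []) cur m = false) :
    pvChooseA need done cur m (a :: tl) = pvChooseA need done cur m tl := by
  rw [pvChooseA, h, hf]
  simp

lemma pvChooseA_findB (need issued : List (List Int)) (done : List Bool) (cur : List Int)
    (m : Nat) (L : List Nat) (hnd : L.Nodup) (hlen : ∀ i ∈ L, i < done.length)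
    (hfeas : ∀ i ∈ L, pvFeasA (need.getD i []) cur m = pvFeasB (need.getD i []) cur) :
    (pvChooseA need done cur m L = -1 ∧ pvFindB cur (pvPend need issued done L) = none)
    ∨ ∃ i ∈ L, done.getD i false = false ∧ pvChooseA need done cur m L = (i : Int) ∧
        pvFindB cur (pvPend need issued done L) =
          some (((i : Int), need.getD i [], issued.getD i []),
                pvPend need issued (done.set i true) L) := by
  induction L with
  | nil => left; exact ⟨rfl, rfl⟩
  | cons a tl ih =>
    simp only [List.nodup_cons] at hnd
    have hmem := fun i hi => hlen i (List.mem_cons_of_mem a hi)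
    have hf := fun i hi => hfeas i (List.mem_cons_of_mem a hi)
    by_cases hd : done.getD a false = true
    · -- a already done: skipped on both sides
      rcases ih hnd.2 hmem hf with ⟨hc, hfb⟩ | ⟨i, hiL, hdi, hc, hfb⟩
      · left
        rw [pvChooseA_cons_true need done cur m a tl hd,
          pvPend_cons_true need issued done a tl hd]
        exact ⟨hc, hfb⟩
      · right
        have hne : i ≠ a := fun he => hnd.1 (he ▸ hiL)
        refine ⟨i, List.mem_cons_of_mem a hiL, hdi, ?_, ?_⟩
        · rw [pvChooseA_cons_true need done cur m a tl hd]; exact hc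
        · rw [pvPend_cons_true need issued done a tl hd, hfb,
            pvPend_cons_true need issued (done.set i true) a tl
              (by rw [pvGetD_set_ne done i a hne]; exact hd)]
    · have hdf : done.getD a false = false := by simpa using hd
      by_cases hfa : pvFeasA (need.getD a []) cur m = true
      · -- a is chosen
        right
        refine ⟨a, List.mem_cons_self, hdf,
          pvChooseA_cons_feas need done cur m a tl hdf hfa, ?_⟩
        rw [pvPend_cons_false need issued done a tl hdf, pvFindB,
          if_pos (by rw [← hfeas a List.mem_cons_self]; exact hfa),
          pvPend_cons_true need issued (done.set a true) a tl
            (pvGetD_set_self done a (hlen a List.mem_cons_self) false),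
          pvPend_set_notmem need issued done a tl hnd.1]
      · -- a infeasible: both sides skip it
        have hfa' : pvFeasA (need.getD a []) cur m = false := by simpa using hfa
        have hfb0 : pvFeasB (need.getD a []) cur = false := by
          rw [← hfeas a List.mem_cons_self]; exact hfa'
        rcases ih hnd.2 hmem hf with ⟨hc, hfbtl⟩ | ⟨i, hiL, hdi, hc, hfbtl⟩
        · left
          refine ⟨?_, ?_⟩
          · rw [pvChooseA_cons_infeas need done cur m a tl hdf hfa']; exact hc
          · rw [pvPend_cons_false need issued done a tl hdf, pvFindB,
              if_neg (by rw [hfb0]; simp), hfbtl]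
        · right
          have hne : i ≠ a := fun he => hnd.1 (he ▸ hiL)
          refine ⟨i, List.mem_cons_of_mem a hiL, hdi, ?_, ?_⟩
          · rw [pvChooseA_cons_infeas need done cur m a tl hdf hfa']; exact hc
          · rw [pvPend_cons_false need issued done a tl hdf, pvFindB,
              if_neg (by rw [hfb0]; simp), hfbtl,
              pvPend_cons_false need issued (done.set i true) a tl
                (by rw [pvGetD_set_ne done i a hne]; exact hdf)]

lemma pvRowA_fold (req iss : List Int) (m : Nat) (h1 : m ≤ req.length) (h2 : m ≤ iss.length)
    (acc : List Int) :
    (List.range m).foldl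
      (fun acc j => acc.bind (fun row =>
        if req.getD j 0 < iss.getD j 0 then none
        else some (row ++ [req.getD j 0 - iss.getD j 0])))
      (some acc)
    = if ∃ j < m, req.getD j 0 < iss.getD j 0 then none
      else some (acc ++ ((req.take m).zip (iss.take m)).map (fun q => q.1 - q.2)) := by
  revert h1 h2
  induction m with
  | zero => intro h1 h2; simp
  | succ m ih =>
    intro h1 h2
    rw [List.range_succ, List.foldl_append, ih (by omega) (by omega)]
    by_cases hv : ∃ j < m, req.getD j 0 < iss.getD j 0
    · obtain ⟨j, hj, hjv⟩ := hv
      rw [if_pos ⟨j, hj, hjv⟩, if_pos ⟨j, by omega, hjv⟩]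
      simp
    · rw [if_neg hv]
      simp only [List.foldl_cons, List.foldl_nil, Option.bind_some]
      by_cases hm : req.getD m 0 < iss.getD m 0
      · rw [if_pos hm, if_pos ⟨m, by omega, hm⟩]
      · rw [if_neg hm, if_neg ?_]
        · have hmr : m < req.length := by omega
          have hmi : m < iss.length := by omega
          have hz : (req.take (m+1)).zip (iss.take (m+1)) =
              (req.take m).zip (iss.take m) ++ [(req[m], iss[m])] := by
            rw [List.take_succ, List.take_succ, List.getElem?_eq_getElem hmr,
              List.getElem?_eq_getElem hmi,
              List.zip_append (by simp [List.length_take]; omega)]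
            simp
          rw [hz, List.map_append]
          simp [List.getElem?_eq_getElem hmr, List.getElem?_eq_getElem hmi]
        · push_neg at hv ⊢
          intro j hj
          rcases Nat.lt_succ_iff_lt_or_eq.1 hj with hlt | rfl
          · exact hv j hlt
          · omega

lemma pvRowA_eq (req iss : List Int) (m : Nat) (h1 : m ≤ req.length) (h2 : m ≤ iss.length) :
    pvRowA req iss m
    = if ∃ j < m, req.getD j 0 < iss.getD j 0 then none
      else some (((req.take m).zip (iss.take m)).map (fun q => q.1 - q.2)) := by
  unfold pvRowA
  rw [pvRowA_fold req iss m h1 h2 []]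
  simp

lemma pvNeedA_fold (issued required : List (List Int)) (m n : Nat)
    (hreq : ∀ i < n, m ≤ (required.getD i []).length)
    (hiss : ∀ i < n, m ≤ (issued.getD i []).length) (acc : List (List Int)) :
    (List.range n).foldl
      (fun acc i => acc.bind (fun need =>
        (pvRowA (required.getD i []) (issued.getD i []) m).map (fun row => need ++ [row])))
      (some acc)
    = if ∃ i < n, ∃ j < m, (required.getD i []).getD j 0 < (issued.getD i []).getD j 0 then none
      else some (acc ++ (List.range n).map (pvRowFor issued required m)) := by
  revert hreq hiss
  induction n with
  | zero => intro _ _; simp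
  | succ n ih =>
    intro hreq hiss
    rw [List.range_succ, List.foldl_append,
      ih (fun i hi => hreq i (by omega)) (fun i hi => hiss i (by omega))]
    by_cases hv : ∃ i < n, ∃ j < m, (required.getD i []).getD j 0 < (issued.getD i []).getD j 0
    · obtain ⟨i, hi, hj⟩ := hv
      rw [if_pos ⟨i, hi, hj⟩, if_pos ⟨i, by omega, hj⟩]
      simp
    · rw [if_neg hv]
      simp only [List.foldl_cons, List.foldl_nil, Option.bind_some]
      rw [pvRowA_eq (required.getD n []) (issued.getD n []) m (hreq n (by omega))
        (hiss n (by omega))]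
      by_cases hn : ∃ j < m, (required.getD n []).getD j 0 < (issued.getD n []).getD j 0
      · rw [if_pos hn, if_pos ⟨n, by omega, hn⟩]
        simp
      · rw [if_neg hn, if_neg ?_]
        · simp [pvRowFor, List.map_append, List.append_assoc]
        · rintro ⟨i, hi, hj⟩
          rcases Nat.lt_succ_iff_lt_or_eq.1 hi with hlt | rfl
          · exact hv ⟨i, hlt, hj⟩
          · exact hn hj

lemma pvNeedB_repr (issued required : List (List Int)) (m : Nat)
    (hn : issued.length ≤ required.length) :
    pvNeedB issued required m = (List.range issued.length).map (pvRowFor issued required m) := by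
  apply List.ext_getElem
  · simp [pvNeedB, List.length_zip]
    omega
  · intro i h1 h2
    have hi : i < issued.length := by simpa using h2
    have hr : i < required.length := by omega
    simp [pvNeedB, pvRowFor, List.getElem_zip, List.getElem?_eq_getElem hi,
      List.getElem?_eq_getElem hr]

lemma pvRowFor_length (issued required : List (List Int)) (m : Nat) (i : Nat)
    (hreq : m ≤ (required.getD i []).length) (hiss : m ≤ (issued.getD i []).length) :
    (pvRowFor issued required m i).length = m := by
  simp only [pvRowFor, List.length_map, List.length_zip, List.length_take]
  omega

lemma pvRowFor_getElem (issued required : List (List Int)) (m i j : Nat)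
    (hreq : m ≤ (required.getD i []).length) (hiss : m ≤ (issued.getD i []).length)
    (hj : j < m) (h : j < (pvRowFor issued required m i).length) :
    (pvRowFor issued required m i)[j]
      = (required.getD i []).getD j 0 - (issued.getD i []).getD j 0 := by
  simp only [pvRowFor, List.getElem_map, List.getElem_zip, List.getElem_take]
  rw [List.getD_eq_getElem (required.getD i []) 0 (by omega),
    List.getD_eq_getElem (issued.getD i []) 0 (by omega)]

lemma pvAnyB (issued required : List (List Int)) (m n : Nat)
    (hreq : ∀ i < n, m ≤ (required.getD i []).length)
    (hiss : ∀ i < n, m ≤ (issued.getD i []).length) :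
    ((List.range n).map (pvRowFor issued required m)).any
        (fun row => row.any (fun x => x < 0)) = true
    ↔ ∃ i < n, ∃ j < m, (required.getD i []).getD j 0 < (issued.getD i []).getD j 0 := by
  simp only [List.any_eq_true, List.mem_map, List.mem_range, decide_eq_true_eq]
  constructor
  · rintro ⟨row, ⟨i, hi, rfl⟩, x, hx, hneg⟩
    obtain ⟨j, hjlt, rfl⟩ := List.mem_iff_getElem.1 hx
    have hjm : j < m := by
      rw [pvRowFor_length issued required m i (hreq i hi) (hiss i hi)] at hjlt
      exact hjlt
    have he := pvRowFor_getElem issued required m i j (hreq i hi) (hiss i hi) hjm hjlt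
    rw [he] at hneg
    exact ⟨i, hi, j, hjm, by omega⟩
  · rintro ⟨i, hi, j, hjm, hlt⟩
    have hjl : j < (pvRowFor issued required m i).length := by
      rw [pvRowFor_length issued required m i (hreq i hi) (hiss i hi)]
      exact hjm
    refine ⟨pvRowFor issued required m i, ⟨i, hi, rfl⟩,
      (pvRowFor issued required m i)[j], List.getElem_mem hjl, ?_⟩
    rw [pvRowFor_getElem issued required m i j (hreq i hi) (hiss i hi) hjm hjl]
    omega

lemma pvReplicate_getD (k a : Nat) : (List.replicate k false).getD a false = false := by
  rcases lt_or_ge a k with h | h <;>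
    simp [List.getD_eq_getElem?_getD, List.getElem?_replicate, h]

lemma pvPend_replicate (need issued : List (List Int)) (k : Nat) (L : List Nat) :
    pvPend need issued (List.replicate k false) L =
      L.map (fun (i : Nat) => ((i : Int), need.getD i [], issued.getD i [])) := by
  induction L with
  | nil => rfl
  | cons a tl ih =>
    rw [pvPend_cons_false need issued _ a tl (pvReplicate_getD k a), List.map_cons, ih]

lemma pvPend_init (need issued : List (List Int)) (hlen : need.length = issued.length) :
    (PySem.List.enumerate (need.zip issued) 0).map (fun p => (p.1, p.2.1, p.2.2)) =
      pvPend need issued (List.replicate issued.length false) (List.range issued.length) := by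
  rw [pvPend_replicate]
  apply List.ext_getElem
  · simp [PySem.List.length_enumerate, List.length_zip, hlen]
  · intro i h1 h2
    have hi : i < issued.length := by simpa using h2
    have hzi : i < (need.zip issued).length := by simp [List.length_zip, hlen]; omega
    simp [PySem.List.getElem_enumerate, List.getElem_zip,
      List.getElem?_eq_getElem hi, List.getElem?_eq_getElem (show i < need.length by omega)]

lemma pvCur_update (cur iss : List Int) (m : Nat) (h1 : cur.length = m) (h2 : m ≤ iss.length) :
    (List.range m).map (fun j => cur.getD j 0 + iss.getD j 0) = cur.zipWith (· + ·) iss := by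
  apply List.ext_getElem
  · simp [List.length_zipWith]
    omega
  · intro j h1 h2
    have hj : j < m := by simpa using h1
    simp [List.getElem_zipWith, List.getElem?_eq_getElem (show j < cur.length by omega),
      List.getElem?_eq_getElem (show j < iss.length by omega)]

lemma pvGoB_nil (cur order : List Int) : pvGoB cur order [] = some order := by
  rw [pvGoB]
  simp

lemma pvGoB_none (cur order : List Int) (pending : List (Int × List Int × List Int))
    (hne : pending ≠ []) (h : pvFindB cur pending = none) :
    pvGoB cur order pending = none := by
  rw [pvGoB, if_neg hne]
  split
  · rfl
  · rename_i q rest heq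
    rw [h] at heq
    cases heq

lemma pvGoB_some (cur order : List Int) (pending : List (Int × List Int × List Int))
    (q : Int × List Int × List Int) (rest : List (Int × List Int × List Int))
    (hne : pending ≠ []) (h : pvFindB cur pending = some (q, rest)) :
    pvGoB cur order pending = pvGoB (cur.zipWith (· + ·) q.2.2) (order ++ [q.1]) rest := by
  rw [pvGoB, if_neg hne]
  split
  · rename_i heq
    rw [h] at heq
    cases heq
  · rename_i q' rest' heq
    rw [h] at heq
    cases heq
    rfl

lemma pvLoop_eq (need issued : List (List Int)) (m n : Nat)
    (hrow : ∀ i < n, (need.getD i []).length = m)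
    (hiss : ∀ i < n, m ≤ (issued.getD i []).length) :
    ∀ (k : Nat) (done : List Bool) (order cur : List Int), done.length = n → cur.length = m →
      (pvPend need issued done (List.range n)).length = k →
      pvLoopA need issued m n k done order cur =
        pvGoB cur order (pvPend need issued done (List.range n)) := by
  intro k
  induction k with
  | zero =>
    intro done order cur hdone hcur hk
    rw [List.length_eq_zero_iff] at hk
    rw [pvLoopA, hk, pvGoB_nil]
  | succ k ihk =>
    intro done order cur hdone hcur hk
    have hpne : pvPend need issued done (List.range n) ≠ [] := by
      intro h0
      rw [h0] at hk
      simp at hk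
    rcases pvChooseA_findB need issued done cur m (List.range n) List.nodup_range
        (fun i hi => hdone ▸ List.mem_range.1 hi)
        (fun i hi => pvFeas_eq _ _ m (hrow i (List.mem_range.1 hi)) hcur) with
      ⟨hc, hfb⟩ | ⟨i, hiL, _hdi, hc, hfb⟩
    · rw [pvLoopA, pvGoB_none cur order _ hpne hfb]
      simp [hc]
    · have hin : i < n := List.mem_range.1 hiL
      have hrest := pvFindB_length cur _ _ _ hfb
      rw [hk] at hrest
      rw [pvLoopA, pvGoB_some cur order _ _ _ hpne hfb]
      simp only [hc]
      have hne : ((i : Nat) : Int) ≠ -1 := by omega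
      rw [if_neg hne]
      simp only [Int.toNat_natCast]
      rw [pvCur_update cur (issued.getD i []) m hcur (hiss i hin)]
      exact ihk (done.set i true) (order ++ [((i : Nat) : Int)]) _ (by simp [hdone])
        (by simp only [List.length_zipWith, hcur]; have := hiss i hin; omega) (by omega)

lemma pvBind_none {α β : Type} (o : Option α) (g : α → Option β) (hg : ∀ x, g x = none) :
    o.bind g = none := by
  cases o <;> simp [hg]

lemma pvRowA_none (req iss : List Int) (m : Nat)
    (h : ∃ j < m, req.getD j 0 < iss.getD j 0) : pvRowA req iss m = none := by
  unfold pvRowA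
  revert h
  induction m with
  | zero =>
    rintro ⟨j, hj, _⟩
    exact absurd hj (by omega)
  | succ m ih =>
    intro h
    rw [List.range_succ, List.foldl_append]
    by_cases hv : ∃ j < m, req.getD j 0 < iss.getD j 0
    · rw [ih hv]
      rfl
    · have hm : req.getD m 0 < iss.getD m 0 := by
        obtain ⟨j, hj, hjv⟩ := h
        rcases Nat.lt_succ_iff_lt_or_eq.1 hj with hlt | rfl
        · exact absurd ⟨j, hlt, hjv⟩ hv
        · exact hjv
      simp only [List.foldl_cons, List.foldl_nil]
      apply pvBind_none
      intro x
      rw [if_pos hm]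

lemma pvFoldNeed_none (issued required : List (List Int)) (m n : Nat)
    (h : ∃ i < n, ∃ j < m, (required.getD i []).getD j 0 < (issued.getD i []).getD j 0) :
    (List.range n).foldl
      (fun acc i => acc.bind (fun need =>
        (pvRowA (required.getD i []) (issued.getD i []) m).map (fun row => need ++ [row])))
      (some []) = none := by
  revert h
  induction n with
  | zero =>
    rintro ⟨i, hi, _⟩
    exact absurd hi (by omega)
  | succ n ih =>
    intro h
    rw [List.range_succ, List.foldl_append]
    by_cases hv : ∃ i < n, ∃ j < m, (required.getD i []).getD j 0 < (issued.getD i []).getD j 0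
    · rw [ih hv]
      rfl
    · have hn : ∃ j < m, (required.getD n []).getD j 0 < (issued.getD n []).getD j 0 := by
        obtain ⟨i, hi, hjv⟩ := h
        rcases Nat.lt_succ_iff_lt_or_eq.1 hi with hlt | rfl
        · exact absurd ⟨i, hlt, hjv⟩ hv
        · exact hjv
      simp only [List.foldl_cons, List.foldl_nil]
      apply pvBind_none
      intro x
      rw [pvRowA_none _ _ m hn]
      rfl

lemma pvNeedA_none (issued required : List (List Int)) (m : Nat)
    (h : ∃ i < issued.length, ∃ j < m,
      (required.getD i []).getD j 0 < (issued.getD i []).getD j 0) :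
    pvNeedA issued required m = none := by
  unfold pvNeedA
  exact pvFoldNeed_none issued required m issued.length h

lemma pvAnyB_of_viol (issued required : List (List Int)) (m : Nat) (i j : Nat)
    (hi : i < issued.length) (hir : i < required.length) (hj : j < m)
    (hjr : j < (required.getD i []).length) (hji : j < (issued.getD i []).length)
    (hv : (required.getD i []).getD j 0 < (issued.getD i []).getD j 0) :
    (pvNeedB issued required m).any (fun row => row.any (fun x => x < 0)) = true := by
  simp only [List.any_eq_true, decide_eq_true_eq]
  have hiz : i < (pvNeedB issued required m).length := by
    simp [pvNeedB, List.length_zip]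
    omega
  refine ⟨(pvNeedB issued required m)[i], List.getElem_mem hiz, ?_⟩
  have hrow : (pvNeedB issued required m)[i]
      = ((required[i].take m).zip (issued[i].take m)).map (fun q => q.1 - q.2) := by
    simp [pvNeedB, List.getElem_zip]
  have hjz : j < (((required[i].take m).zip (issued[i].take m)).map
      (fun q => q.1 - q.2)).length := by
    simp [List.length_zip, List.length_take]
    rw [List.getD_eq_getElem required [] hir] at hjr
    rw [List.getD_eq_getElem issued [] hi] at hji
    omega
  rw [hrow]
  refine ⟨_, List.getElem_mem hjz, ?_⟩
  rw [List.getElem_map, List.getElem_zip]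
  simp only [List.getElem_take]
  rw [List.getD_eq_getElem required [] hir] at hv hjr
  rw [List.getD_eq_getElem issued [] hi] at hv hji
  rw [List.getD_eq_getElem _ 0 hjr, List.getD_eq_getElem _ 0 hji] at hv
  omega

theorem safe_order_spec : Claim_equal_safe_order := by
  intro avail issued required _dom hpre
  unfold Spec_safe_order
  rcases hpre with hcomp | ⟨i, hi, hir, ⟨j, hj, hjr, hji, hv⟩, _hprior⟩
  · -- all rows complete: no violation anywhere, both run the greedy loop
    have hlen : issued.length ≤ required.length := by
      by_contra hc
      exact absurd (hcomp required.length (by omega)).1 (by omega)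
    have hissL : ∀ i < issued.length, avail.length ≤ (issued.getD i []).length :=
      fun i hi => (hcomp i hi).2.2.1
    have hreqL : ∀ i < issued.length, avail.length ≤ (required.getD i []).length :=
      fun i hi => (hcomp i hi).2.1
    have hE : ¬∃ i < issued.length, ∃ j < avail.length,
        (required.getD i []).getD j 0 < (issued.getD i []).getD j 0 := by
      rintro ⟨i, hi, j, hj, hjv⟩
      exact (hcomp i hi).2.2.2 j hj hjv
    have hrowL : ∀ i < issued.length,
        (((List.range issued.length).map (pvRowFor issued required avail.length)).getD i []).length
          = avail.length := by
      intro i hi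
      rw [List.getD_eq_getElem _ [] (by simpa using hi), List.getElem_map]
      exact pvRowFor_length issued required avail.length _ (by
          rw [List.getElem_range]
          exact hreqL i hi)
        (by rw [List.getElem_range]; exact hissL i hi)
    simp only [safe_order, safe_order_alt]
    unfold pvNeedA
    rw [pvNeedA_fold issued required avail.length issued.length hreqL hissL [],
      pvNeedB_repr issued required avail.length hlen]
    rw [if_neg hE,
      if_neg (fun hany =>
        hE ((pvAnyB issued required avail.length issued.length hreqL hissL).1 hany))]
    simp only [List.nil_append]
    have hpi := pvPend_init ((List.range issued.length).map (pvRowFor issued required avail.length))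
      issued (by simp)
    rw [hpi, pvPend_replicate]
    rw [pvLoop_eq ((List.range issued.length).map (pvRowFor issued required avail.length)) issued
      avail.length issued.length hrowL hissL issued.length (List.replicate issued.length false)
      [] avail (by simp) rfl (by rw [pvPend_replicate]; simp), pvPend_replicate]
  · -- an in-range violation: both return [-1]
    simp only [safe_order, safe_order_alt]
    rw [pvNeedA_none issued required avail.length ⟨i, hi, j, hj, hv⟩,
      if_pos (pvAnyB_of_viol issued required avail.length i j hi hir hj hjr hji hv)]
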